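-- pv_equiv track=rewrite | github.com/lcmd-epfl/cibo | misc/greedy_batch/freesolv_cost_opt.py | select_batch
-- ===== SOURCE A (Python) =====
-- from itertools import combinations
--
-- def select_batch(suggested_costs, MAX_BATCH_COST, BATCH_SIZE):
--     n = len(suggested_costs)
--     # Check if BATCH_SIZE is larger than the length of the array, if so return None
--     if BATCH_SIZE > n:
--         return None
--
--     best_indices = None
--     # We start checking combinations from BATCH_SIZE down to 1 to prioritize getting BATCH_SIZE elements
--     for size in reversed(range(1, BATCH_SIZE + 1)):
--         for indices in combinations(range(n), size):
--             batch_sum = sum(suggested_costs[i] for i in indices)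
--             if batch_sum <= MAX_BATCH_COST:
--                 best_indices = list(indices)
--                 return best_indices  # Return the first combination that meets the condition
--     return None
-- ===== SOURCE B (Python) =====
-- def select_batch(suggested_costs, MAX_BATCH_COST, BATCH_SIZE):
--     n = len(suggested_costs)
--     if BATCH_SIZE > n:
--         return None
--
--     kmax = BATCH_SIZE if BATCH_SIZE > 0 else 0
--     # ms[i][k] = minimal sum of k elements chosen from suggested_costs[i:] (None if k > n - i)
--     ms = [[None] * (kmax + 1) for _ in range(n + 1)]
--     for i in range(n, -1, -1):
--         ms[i][0] = 0
--         if i < n: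
--             for k in range(1, kmax + 1):
--                 a = ms[i + 1][k - 1]
--                 b = ms[i + 1][k]
--                 best = None if a is None else suggested_costs[i] + a
--                 if b is not None and (best is None or b < best):
--                     best = b
--                 ms[i][k] = best
--
--     for size in range(BATCH_SIZE, 0, -1):
--         m = ms[0][size]
--         if m is not None and m <= MAX_BATCH_COST:
--             # lexicographically first feasible index set of this size, built greedily
--             res = []
--             rem = MAX_BATCH_COST
--             i = 0
--             k = size
--             while k > 0:
--                 a = ms[i + 1][k - 1]
--                 if a is not None and suggested_costs[i] + a <= rem:
--                     res.append(i)
--                     rem -= suggested_costs[i]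
--                     k -= 1
--                 i += 1
--             return res
--     return None
-- ===== Notes on version B (the rewrite author's own statement) =====
-- stated objective: alternative
-- what changed: Replaced the exhaustive scan over itertools.combinations with a bottom-up DP table of minimal k-element suffix sums plus a greedy lexicographic construction of the first feasible index set.
import Mathlib
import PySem

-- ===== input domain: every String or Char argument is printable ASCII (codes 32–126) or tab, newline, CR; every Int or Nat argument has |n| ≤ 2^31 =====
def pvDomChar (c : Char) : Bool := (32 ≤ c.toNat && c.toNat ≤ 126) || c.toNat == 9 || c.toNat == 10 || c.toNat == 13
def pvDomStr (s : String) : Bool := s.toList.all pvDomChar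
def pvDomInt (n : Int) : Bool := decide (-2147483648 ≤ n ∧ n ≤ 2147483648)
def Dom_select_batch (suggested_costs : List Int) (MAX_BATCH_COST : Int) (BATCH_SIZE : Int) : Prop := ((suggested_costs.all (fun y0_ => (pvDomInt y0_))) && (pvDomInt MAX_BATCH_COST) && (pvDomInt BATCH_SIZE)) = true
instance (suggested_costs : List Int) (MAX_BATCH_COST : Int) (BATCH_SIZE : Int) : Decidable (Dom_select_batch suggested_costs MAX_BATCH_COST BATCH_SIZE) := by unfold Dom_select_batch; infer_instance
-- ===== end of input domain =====

-- B replaces A's exhaustive scan over itertools.combinations by a min-k-sum DP table plus a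
-- greedy lexicographic construction of the first feasible index set (objective: alternative).

-- ===== PORT A =====
-- itertools.combinations(l, k) in lexicographic order (exact semantics of the Python iterator, as a list)
def pvCombs (l : List Nat) (k : Nat) : List (List Nat) :=
  match k, l with
  | 0, _ => [[]]
  | _ + 1, [] => []
  | k + 1, x :: xs => (pvCombs xs k).map (x :: ·) ++ pvCombs xs (k + 1)

-- A's outer loop: for size in reversed(range(1, BATCH_SIZE+1)): first combination with sum <= MAX
def pvALoop (costs : List Int) (MAX : Int) (n : Nat) (sizes : List Int) : Option (List Int) :=
  match sizes with
  | [] => none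
  | s :: rest =>
    match (pvCombs (List.range n) s.toNat).find?
        (fun idxs => decide ((idxs.map (fun i => costs.getD i 0)).sum ≤ MAX)) with
    | some t => some (t.map Int.ofNat)
    | none => pvALoop costs MAX n rest

def select_batch (suggested_costs : List Int) (MAX_BATCH_COST : Int) (BATCH_SIZE : Int) : Option (List Int) :=
  let n := suggested_costs.length
  if BATCH_SIZE > (n : Int) then none
  else pvALoop suggested_costs MAX_BATCH_COST n ((PySem.List.pyRange 1 (BATCH_SIZE + 1) 1).reverse)

-- ===== PORT B =====
-- ms[i][k] of Source B: minimal sum of k elements of the suffix l (none if k > |l|); same recurrence as the table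
def pvMsum (l : List Int) (k : Nat) : Option Int :=
  match k, l with
  | 0, _ => some 0
  | _ + 1, [] => none
  | k + 1, x :: xs =>
    match pvMsum xs k, pvMsum xs (k + 1) with
    | none, none => none
    | some a, none => some (x + a)
    | none, some b => some b
    | some a, some b => some (if b < x + a then b else x + a)

-- Source B's greedy while-loop: take index idx iff the remaining k-1 elements can still fit in rem
def pvBGo (l : List Int) (k : Nat) (rem : Int) (idx : Nat) : List Nat :=
  match k, l with
  | 0, _ => []
  | _ + 1, [] => []
  | k + 1, x :: xs =>
    match pvMsum xs k with
    | some a =>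
      if x + a ≤ rem then idx :: pvBGo xs k (rem - x) (idx + 1)
      else pvBGo xs (k + 1) rem (idx + 1)
    | none => pvBGo xs (k + 1) rem (idx + 1)

-- Source B's outer loop: for size in range(BATCH_SIZE, 0, -1): feasibility test then greedy build
def pvBLoop (costs : List Int) (MAX : Int) (sizes : List Int) : Option (List Int) :=
  match sizes with
  | [] => none
  | s :: rest =>
    match pvMsum costs s.toNat with
    | some m =>
      if m ≤ MAX then some ((pvBGo costs s.toNat MAX 0).map Int.ofNat)
      else pvBLoop costs MAX rest
    | none => pvBLoop costs MAX rest

def select_batch_alt (suggested_costs : List Int) (MAX_BATCH_COST : Int) (BATCH_SIZE : Int) : Option (List Int) :=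
  if BATCH_SIZE > (suggested_costs.length : Int) then none
  else pvBLoop suggested_costs MAX_BATCH_COST (PySem.List.pyRange BATCH_SIZE 0 (-1))

-- ===== PRECONDITION & SPEC =====
def Spec_select_batch (suggested_costs : List Int) (MAX_BATCH_COST : Int) (BATCH_SIZE : Int) (out : Option (List Int)) : Prop := out = select_batch_alt suggested_costs MAX_BATCH_COST BATCH_SIZE
instance (suggested_costs : List Int) (MAX_BATCH_COST : Int) (BATCH_SIZE : Int) (out : Option (List Int)) : Decidable (Spec_select_batch suggested_costs MAX_BATCH_COST BATCH_SIZE out) := by unfold Spec_select_batch; infer_instance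

-- ===== CLAIM (what is proved, stated in full; the proofs are below) =====
def Claim_equal_select_batch : Prop := ∀ (suggested_costs : List Int) (MAX_BATCH_COST : Int) (BATCH_SIZE : Int), Dom_select_batch suggested_costs MAX_BATCH_COST BATCH_SIZE → Spec_select_batch suggested_costs MAX_BATCH_COST BATCH_SIZE (select_batch suggested_costs MAX_BATCH_COST BATCH_SIZE)

-- ===== LEMMAS AND PROOFS =====
-- Core: on the suffix l = full.drop d, A's "first combination with sum ≤ rem" equals
-- B's "if the k smallest fit, the greedy lex-first selection".
lemma pv_find_append {α : Type} (p : α → Bool) (l₁ l₂ : List α) :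
    List.find? p (l₁ ++ l₂) = ((List.find? p l₁).orElse fun _ => List.find? p l₂) := by
  induction l₁ with
  | nil => rfl
  | cons x xs ih => by_cases h : p x <;> simp [h, ih]

lemma pv_main (full : List Int) (l : List Int) (d k : Nat) (rem : Int)
    (h : full.drop d = l) :
    (pvCombs (List.range' d l.length) k).find?
        (fun idxs => decide ((idxs.map (fun i => full.getD i 0)).sum ≤ rem))
    = match pvMsum l k with
      | some m => if m ≤ rem then some (pvBGo l k rem d) else none
      | none => none := by
  induction l generalizing d k rem with
  | nil =>
    cases k with
    | zero =>
      simp only [List.length_nil, List.range', pvCombs, pvMsum, pvBGo, List.find?]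
      by_cases h0 : (0:Int) ≤ rem <;> simp [h0]
    | succ k => simp [pvCombs, pvMsum]
  | cons x xs ih =>
    have hx : full.getD d 0 = x := by
      have : full[d]? = some x := by
        have h0 : (full.drop d)[0]? = some x := by rw [h]; rfl
        simpa using h0
      simp [List.getD, this]
    have hd : full.drop (d + 1) = xs := by
      have h2 : (full.drop d).drop 1 = full.drop (d + 1) := by
        rw [List.drop_drop]
      rw [← h2, h]
      rfl
    cases k with
    | zero =>
      simp only [pvCombs, pvMsum, pvBGo, List.find?]
      by_cases h0 : (0:Int) ≤ rem <;> simp [h0]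
    | succ k =>
      have IH1 := ih (d + 1) k (rem - x) hd
      have IH2 := ih (d + 1) (k + 1) rem hd
      have hp : (fun t => decide ((((d :: t)).map (fun i => full.getD i 0)).sum ≤ rem))
          = fun t => decide ((t.map (fun i => full.getD i 0)).sum ≤ rem - x) := by
        funext t
        simp only [List.map_cons, List.sum_cons, hx]
        exact decide_eq_decide.mpr (by omega)
      simp only [List.length_cons, List.range'_succ, pvCombs]
      rw [pv_find_append, List.find?_map]
      have hcomp : ((fun idxs => decide ((List.map (fun i => full.getD i 0) idxs).sum ≤ rem)) ∘ (d :: ·))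
          = fun t => decide ((t.map (fun i => full.getD i 0)).sum ≤ rem - x) := by
        funext t
        simpa using congrFun hp t
      rw [hcomp, IH1, IH2]
      rcases ha : pvMsum xs k with _ | a <;> rcases hb : pvMsum xs (k + 1) with _ | b <;>
        simp only [pvMsum, pvBGo, ha, hb]
      · rfl
      · by_cases h1 : b ≤ rem <;> simp [h1]
      · by_cases h1 : a ≤ rem - x <;> by_cases h2 : x + a ≤ rem <;>
          simp [h1, h2] <;> omega
      · by_cases h1 : a ≤ rem - x <;> by_cases h2 : x + a ≤ rem <;>
          by_cases h3 : b < x + a <;> by_cases h4 : b ≤ rem <;>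
          simp [h1, h2, h3, h4] <;> omega

lemma pv_loop (costs : List Int) (MAX : Int) (sizes : List Int) :
    pvALoop costs MAX costs.length sizes = pvBLoop costs MAX sizes := by
  induction sizes with
  | nil => rfl
  | cons s rest ih =>
    simp only [pvALoop, pvBLoop]
    rw [List.range_eq_range', pv_main costs costs 0 s.toNat MAX rfl]
    rcases hm : pvMsum costs s.toNat with _ | m
    · simp [ih]
    · by_cases h1 : m ≤ MAX <;> simp [h1, ih]

-- ===== VERDICT (by name: the statement is the Claim_ definition above) =====
theorem select_batch_spec : Claim_equal_select_batch := by
  intro costs MAX B _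
  unfold Spec_select_batch select_batch select_batch_alt
  simp only []
  split
  · rfl
  · rw [PySem.List.pyRange_neg_one_eq_reverse]
    norm_num
    exact pv_loop costs MAX _
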